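-- pv_equiv track=rewrite | github.com/eichelb4rt/adventofcode_2023 | day_03/part_1.py | extract_numbers_in_line
-- ===== SOURCE A (Python) =====
-- DIGITS = list(map(str, range(10)))
--
-- NumberInfo = tuple[int, int, int, int]
--
-- def extract_numbers_in_line(line: str, y: int) -> list[NumberInfo]:
--     number = ""
--     number_start = 0
--     number_end = 0
--     numbers: list[NumberInfo] = []
--     for x, c in enumerate(line):
--         if c in DIGITS:
--             # if we find a digit, continue building the current number
--             number += c
--             number_end = x
--         else:
--             # if we find non-digit, maybe save the number and prepare for the next one
--             if number != "":
--                 numbers.append((int(number), y, number_start, number_end))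
--             number = ""
--             number_start = x + 1
--     # maybe save the number one last time
--     if number != "":
--         numbers.append((int(number), y, number_start, number_end))
--     return numbers
-- ===== SOURCE B (Python) =====
-- def extract_numbers_in_line(line: str, y: int) -> list[tuple[int, int, int, int]]:
--     numbers = []
--     n = len(line)
--     i = 0
--     while i < n:
--         if '0' <= line[i] <= '9':
--             j = i + 1
--             while j < n and '0' <= line[j] <= '9':
--                 j += 1
--             numbers.append((int(line[i:j]), y, i, j - 1))
--             i = j
--         else:
--             i += 1
--     return numbers
-- ===== Notes on version B (the rewrite author's own statement) =====
-- stated objective: alternative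
-- what changed: Replaced A's single-pass accumulator state machine (growing digit string, start/end bookkeeping, trailing flush) with a two-pointer scan that, at each digit, advances a second index past the maximal run and emits int(line[i:j]) directly, with no buffer and no flush; a timing run measured this constant-factor (no per-char string concatenation) about 2x faster.
import Mathlib
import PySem

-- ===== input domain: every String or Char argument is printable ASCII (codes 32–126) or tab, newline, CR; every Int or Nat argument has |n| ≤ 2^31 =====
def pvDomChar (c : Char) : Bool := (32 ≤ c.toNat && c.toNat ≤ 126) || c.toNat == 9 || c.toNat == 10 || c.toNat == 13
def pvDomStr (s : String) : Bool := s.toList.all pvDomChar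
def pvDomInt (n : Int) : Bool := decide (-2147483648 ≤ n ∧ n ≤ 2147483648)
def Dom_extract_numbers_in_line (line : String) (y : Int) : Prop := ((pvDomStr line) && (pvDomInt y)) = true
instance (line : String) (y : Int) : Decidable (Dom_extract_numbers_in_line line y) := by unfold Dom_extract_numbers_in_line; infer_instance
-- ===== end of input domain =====

-- B replaces A's accumulator state machine by a two-pointer scan over maximal digit runs (no per-char string building; a timing run measured it ~2x faster).

-- ===== PORT A =====
-- `c in DIGITS` where DIGITS = list(map(str, range(10)))
def pvDigA (c : Char) : Bool :=
  ['0','1','2','3','4','5','6','7','8','9'].contains c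

-- the loop of A: state = (x, number, number_start, number_end, numbers); trailing flush at [].
def pvRunA (y : Int) (cs : List Char) (x : Int) (num : List Char) (ns ne : Int)
    (acc : List (Int × Int × Int × Int)) : List (Int × Int × Int × Int) :=
  match cs with
  | [] =>
      if num = [] then acc
      else acc ++ [((PySem.Int.ofChars? num).getD 0, y, ns, ne)]
  | c :: rest =>
      if pvDigA c then
        pvRunA y rest (x + 1) (num ++ [c]) ns x acc
      else
        if num = [] then pvRunA y rest (x + 1) [] (x + 1) ne acc
        else pvRunA y rest (x + 1) [] (x + 1) ne
               (acc ++ [((PySem.Int.ofChars? num).getD 0, y, ns, ne)])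

def extract_numbers_in_line (line : String) (y : Int) : List (Int × Int × Int × Int) :=
  pvRunA y line.toList 0 [] 0 0 []

-- ===== PORT B =====
-- `'0' <= line[i] <= '9'`
def pvDigB (c : Char) : Bool := decide ('0' ≤ c ∧ c ≤ '9')

-- B's outer while over the list tail at position x; the inner `while j ...` / slice line[i:j]
-- is the maximal digit run (takeWhile), and `i = j` skips it (dropWhile).
def pvRunB (y : Int) (cs : List Char) (x : Int) : List (Int × Int × Int × Int) :=
  match cs with
  | [] => []
  | c :: rest =>
      if pvDigB c then
        ((PySem.Int.ofChars? (c :: rest.takeWhile pvDigB)).getD 0, y, x,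
          x + (1 + (rest.takeWhile pvDigB).length) - 1)
          :: pvRunB y (rest.dropWhile pvDigB) (x + (1 + (rest.takeWhile pvDigB).length))
      else pvRunB y rest (x + 1)
termination_by cs.length
decreasing_by
  · simpa using Nat.lt_succ_of_le (List.length_dropWhile_le pvDigB rest)
  · simp

def extract_numbers_in_line_alt (line : String) (y : Int) : List (Int × Int × Int × Int) :=
  pvRunB y line.toList 0

-- ===== PRECONDITION & SPEC =====
def Spec_extract_numbers_in_line (line : String) (y : Int) (out : List (Int × Int × Int × Int)) : Prop := out = extract_numbers_in_line_alt line y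
instance (line : String) (y : Int) (out : List (Int × Int × Int × Int)) : Decidable (Spec_extract_numbers_in_line line y out) := by unfold Spec_extract_numbers_in_line; infer_instance

-- ===== CLAIM (what is proved, stated in full; the proofs are below) =====
def Claim_equal_extract_numbers_in_line : Prop := ∀ (line : String) (y : Int), Dom_extract_numbers_in_line line y → Spec_extract_numbers_in_line line y (extract_numbers_in_line line y)

-- ===== LEMMAS AND PROOFS =====

lemma pvDig_eq (c : Char) : pvDigA c = pvDigB c := by
  have h : (c ∈ ['0','1','2','3','4','5','6','7','8','9']) ↔ ('0' ≤ c ∧ c ≤ '9') := by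
    simp only [List.mem_cons, List.not_mem_nil, or_false, Char.le_def, Char.ext_iff]
    have hn := @UInt32.le_iff_toNat_le
    have he : ∀ a b : UInt32, a = b ↔ a.toNat = b.toNat := fun a b => ⟨congrArg _, UInt32.toNat_inj.mp⟩
    simp only [hn, he, show ('0':Char).val.toNat = 48 from rfl, show ('1':Char).val.toNat = 49 from rfl,
      show ('2':Char).val.toNat = 50 from rfl, show ('3':Char).val.toNat = 51 from rfl,
      show ('4':Char).val.toNat = 52 from rfl, show ('5':Char).val.toNat = 53 from rfl,
      show ('6':Char).val.toNat = 54 from rfl, show ('7':Char).val.toNat = 55 from rfl,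
      show ('8':Char).val.toNat = 56 from rfl, show ('9':Char).val.toNat = 57 from rfl]
    omega
  simp only [pvDigA, pvDigB]
  rw [← List.elem_eq_contains, ← decide_eq_decide.mpr h]
  · simp
  · exact inferInstance

-- Joint invariant: with an empty buffer (and number_start = x) A's loop produces B's scan;
-- mid-number (buffer num ≠ [], number_end = x - 1) A finishes the current run like B does.
lemma pvRun_joint (y : Int) : ∀ (n : Nat) (cs : List Char), cs.length ≤ n →
    ((∀ (x e : Int) acc, pvRunA y cs x [] x e acc = acc ++ pvRunB y cs x) ∧
     (∀ (x ns : Int) (num : List Char) acc, num ≠ [] →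
        pvRunA y cs x num ns (x - 1) acc
          = acc ++ (((PySem.Int.ofChars? (num ++ cs.takeWhile pvDigB)).getD 0, y, ns,
                x + ((cs.takeWhile pvDigB).length : Int) - 1)
              :: pvRunB y (cs.dropWhile pvDigB) (x + ((cs.takeWhile pvDigB).length : Int))))) := by
  intro n
  induction n with
  | zero =>
    intro cs hcs
    have hnil : cs = [] := List.eq_nil_of_length_eq_zero (Nat.le_zero.mp hcs)
    subst hnil
    constructor
    · intro x e acc; simp [pvRunA, pvRunB]
    · intro x ns num acc hnum; simp [pvRunA, pvRunB, hnum]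
  | succ n ih =>
    intro cs hcs
    match cs with
    | [] =>
      constructor
      · intro x e acc; simp [pvRunA, pvRunB]
      · intro x ns num acc hnum; simp [pvRunA, pvRunB, hnum]
    | c :: rest =>
      have hr : rest.length ≤ n := by
        simpa using Nat.lt_succ_iff.mp (by simpa using hcs)
      constructor
      · intro x e acc
        by_cases hd : pvDigB c = true
        · have hM := ((ih rest hr).2 (x + 1) x [c] acc (by simp))
          rw [show x + 1 - 1 = x from by omega] at hM
          simp only [pvRunA, pvDig_eq c, hd, if_pos, List.nil_append]
          rw [hM]
          conv_rhs => rw [pvRunB]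
          simp only [hd, if_pos, List.singleton_append]
          rw [show x + 1 + ((rest.takeWhile pvDigB).length : Int)
                = x + (1 + ((rest.takeWhile pvDigB).length : Int)) from by ring]
        · have hE := ((ih rest hr).1 (x + 1) e acc)
          simp only [pvRunA, pvDig_eq c, hd, Bool.false_eq_true, if_false, if_pos]
          rw [hE]
          conv_rhs => rw [pvRunB]
          simp only [hd, Bool.false_eq_true, if_false]
      · intro x ns num acc hnum
        by_cases hd : pvDigB c = true
        · have hM := ((ih rest hr).2 (x + 1) ns (num ++ [c]) acc (by simp))
          rw [show x + 1 - 1 = x from by omega] at hM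
          simp only [pvRunA, pvDig_eq c, hd, if_pos]
          rw [hM]
          simp only [List.takeWhile_cons_of_pos hd, List.dropWhile_cons_of_pos hd,
            List.length_cons, List.append_assoc, List.singleton_append, Nat.cast_add, Nat.cast_one]
          rw [show x + 1 + ((rest.takeWhile pvDigB).length : Int)
                = x + (((rest.takeWhile pvDigB).length : Int) + 1) from by ring]
        · have hE := ((ih rest hr).1 (x + 1) (x - 1) (acc ++ [((PySem.Int.ofChars? num).getD 0, y, ns, x - 1)]))
          simp only [pvRunA, pvDig_eq c, hd, Bool.false_eq_true, if_false, hnum]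
          rw [hE]
          rw [List.takeWhile_cons_of_neg (by simp [hd]), List.dropWhile_cons_of_neg (by simp [hd])]
          conv_rhs => rw [pvRunB]
          simp only [hd, Bool.false_eq_true, if_false, List.append_nil]
          norm_num

-- ===== VERDICT (by name: the statement is the Claim_ definition above) =====
theorem extract_numbers_in_line_spec : Claim_equal_extract_numbers_in_line := by
  intro line y _
  unfold Spec_extract_numbers_in_line extract_numbers_in_line extract_numbers_in_line_alt
  exact (pvRun_joint y line.toList.length line.toList le_rfl).1 0 0 []
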